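-- pv_equiv track=rewrite | github.com/housestudy/codingTest | dasol/석유시추.py | solution
-- ===== SOURCE A (Python) =====
-- from collections import deque
--
-- def solution(land):
--     answer = 0
--     row = len(land)
--     col = len(land[0])
--     dp = [0 for _ in range(col)]
--     def bfs(i,j):
--         dx, dy = [-1, 1, 0, 0] , [0, 0, -1, 1]
--         size = 0
--         left = j
--         right = j
--         land[i][j] = 0
--         q = deque([[i,j]])
--
--         while q:
--             x, y = q.popleft()
--             size += 1
--             for i in range(4):
--                 nx , ny = x +dx[i], y + dy[i]
--                 if 0 <= nx < row and 0 <= ny < col :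
--                     if land[nx][ny] == 1 :
--                         land[nx][ny] = 0
--                         q.append([nx,ny])
--                         if ny < left :
--                             left = ny
--                         if ny > right:
--                             right = ny
--         return size, left, right
--
--     for i in range(col):
--         for j in range(row):
--             if land[j][i] == 1:
--                 size, left, right = bfs(j,i)
--                 for k in range(left, right + 1):
--                     dp[k] += size
--
--
--
--     answer = max(dp)
--     return answer
-- ===== SOURCE B (Python) =====
-- def solution(land):
--     row = len(land)
--     col = len(land[0])
--     diff = [0] * (col + 1)
--
--     def flood(si, sj):
--         # append-only arena with a read pointer; collects the whole component
--         land[si][sj] = 0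
--         comp = [(si, sj)]
--         k = 0
--         while k < len(comp):
--             x, y = comp[k]
--             for nx, ny in ((x - 1, y), (x + 1, y), (x, y - 1), (x, y + 1)):
--                 if 0 <= nx < row and 0 <= ny < col and land[nx][ny] == 1:
--                     land[nx][ny] = 0
--                     comp.append((nx, ny))
--             k += 1
--         return comp
--
--     for i in range(col):
--         for j in range(row):
--             if land[j][i] == 1:
--                 comp = flood(j, i)
--                 cols = [c for _, c in comp]
--                 size = len(comp)
--                 # difference array: O(1) per component instead of a range add
--                 diff[min(cols)] += size
--                 diff[max(cols) + 1] -= size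
--
--     best = run = 0
--     for k in range(col):
--         run += diff[k]
--         if run > best:
--             best = run
--     return best
-- ===== Notes on version B (the rewrite author's own statement) =====
-- stated objective: alternative
-- what changed: B replaces A's deque BFS carrying running size/left/right accumulators by an append-only arena with a read pointer that collects the whole component and aggregates (len/min/max) afterwards, and replaces the per-component dp range-add plus max(dp) by a difference array read off with one prefix-sum/running-max sweep.
import Mathlib
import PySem

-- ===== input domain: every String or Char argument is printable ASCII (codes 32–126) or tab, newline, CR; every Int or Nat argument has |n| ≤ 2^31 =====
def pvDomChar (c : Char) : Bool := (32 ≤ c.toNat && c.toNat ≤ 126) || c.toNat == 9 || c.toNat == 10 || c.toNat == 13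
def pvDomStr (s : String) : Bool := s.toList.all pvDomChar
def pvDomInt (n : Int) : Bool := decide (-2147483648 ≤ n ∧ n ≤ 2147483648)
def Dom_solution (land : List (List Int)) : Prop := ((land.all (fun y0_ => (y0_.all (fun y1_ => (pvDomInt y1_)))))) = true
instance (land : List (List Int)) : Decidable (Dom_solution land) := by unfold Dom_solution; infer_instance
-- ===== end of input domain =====

-- B replaces A's deque BFS with running size/left/right accumulators by an append-only arena
-- with a read pointer that collects the whole component and takes len/min/max afterwards, and
-- replaces the per-component dp range-add + max(dp) by a difference array read off in one
-- prefix-sum/running-max sweep; return value AND the in-place zeroing of land agree.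

-- ===== PORT A =====
-- land[x][y] read/write for the guarded accesses the ports make (all guarded by
-- 0 ≤ x < row and 0 ≤ y < col); exact under Pre_solution, where every row has length ≥ col.
def gget (g : List (List Int)) (x y : Int) : Int :=
  if 0 ≤ x ∧ 0 ≤ y then (g.getD x.toNat []).getD y.toNat 0 else 0

def gset (g : List (List Int)) (x y v : Int) : List (List Int) :=
  if 0 ≤ x ∧ 0 ≤ y then g.set x.toNat ((g.getD x.toNat []).set y.toNat v) else g

-- number of cells equal to 1: fuel bound for the while-loops (each iteration pops one
-- worklist entry and zeroes every 1-cell it enqueues, so ones+pending drops by 1).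
def ones (g : List (List Int)) : Nat := (g.map (fun rw => rw.count 1)).sum

def dxA : List Int := [-1, 1, 0, 0]
def dyA : List Int := [0, 0, -1, 1]

-- body of A's `for i in range(4)` neighbour scan
def visitA (row col : Int) (st : List (List Int) × List (Int × Int) × Int × Int)
    (n : Int × Int) : List (List Int) × List (Int × Int) × Int × Int :=
  if 0 ≤ n.1 ∧ n.1 < row ∧ 0 ≤ n.2 ∧ n.2 < col then
    if gget st.1 n.1 n.2 = 1 then
      (gset st.1 n.1 n.2 0, st.2.1 ++ [n],
       (if n.2 < st.2.2.1 then n.2 else st.2.2.1),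
       (if st.2.2.2 < n.2 then n.2 else st.2.2.2))
    else st
  else st

-- A's `while q:` loop; q is the deque (popleft = head, append = snoc)
def loopA (row col : Int) :
    Nat → List (List Int) → List (Int × Int) → Int → Int → Int →
    List (List Int) × Int × Int × Int
  | 0, g, _, size, left, right => (g, size, left, right)
  | fuel + 1, g, q, size, left, right =>
    match q with
    | [] => (g, size, left, right)
    | (x, y) :: rest =>
      let st := (PySem.List.pyRange 0 4 1).foldl
        (fun st k => visitA row col st (x + PySem.List.pyGetD dxA k 0, y + PySem.List.pyGetD dyA k 0))
        (g, rest, left, right)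
      loopA row col fuel st.1 st.2.1 (size + 1) st.2.2.1 st.2.2.2

def bfsA (row col : Int) (g : List (List Int)) (i j : Int) :
    List (List Int) × Int × Int × Int :=
  let g1 := gset g i j 0
  loopA row col (ones g1 + 1) g1 [(i, j)] 0 j j

def solution (land : List (List Int)) : Int :=
  let row : Int := land.length
  let col : Int := (land.headD []).length  -- land[0]; IndexError on land = [] (outside Pre_solution)
  let st := (PySem.List.pyRange 0 col 1).foldl (fun st i =>
      (PySem.List.pyRange 0 row 1).foldl (fun st j =>
        if gget st.1 j i = 1 then
          let rr := bfsA row col st.1 j i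
          (rr.1,
           (PySem.List.pyRange rr.2.2.1 (rr.2.2.2 + 1) 1).foldl
             (fun dp k => PySem.List.pySetD dp k (PySem.List.pyGetD dp k 0 + rr.2.1)) st.2)
        else st) st)
    (land, List.replicate col.toNat (0 : Int))
  ((PySem.List.max? st.2 (fun v => v)).getD 0)  -- max(dp); none only for dp = [] (outside Pre_solution)

-- ===== PORT B =====
-- body of B's neighbour scan: zero the fresh 1-cells and append them to the arena
def visitB (row col : Int) (st : List (List Int) × List (Int × Int)) (n : Int × Int) :
    List (List Int) × List (Int × Int) :=
  if 0 ≤ n.1 ∧ n.1 < row ∧ 0 ≤ n.2 ∧ n.2 < col then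
    if gget st.1 n.1 n.2 = 1 then (gset st.1 n.1 n.2 0, st.2 ++ [n]) else st
  else st

-- B's `while k < len(comp):` loop — comp only ever grows, k is the read pointer
def loopB (row col : Int) :
    Nat → List (List Int) → List (Int × Int) → Nat → List (List Int) × List (Int × Int)
  | 0, g, comp, _ => (g, comp)
  | fuel + 1, g, comp, k =>
    if k < comp.length then
      let c := comp.getD k (0, 0)
      let st := [(c.1 - 1, c.2), (c.1 + 1, c.2), (c.1, c.2 - 1), (c.1, c.2 + 1)].foldl
        (visitB row col) (g, comp)
      loopB row col fuel st.1 st.2 (k + 1)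
    else (g, comp)

def floodB (row col : Int) (g : List (List Int)) (si sj : Int) :
    List (List Int) × List (Int × Int) :=
  loopB row col (ones (gset g si sj 0) + 1) (gset g si sj 0) [(si, sj)] 0

def solution_alt (land : List (List Int)) : Int :=
  let row : Int := land.length
  let col : Int := (land.headD []).length  -- land[0]; IndexError on land = [] (outside Pre_solution)
  let st := (PySem.List.pyRange 0 col 1).foldl (fun st i =>
      (PySem.List.pyRange 0 row 1).foldl (fun st j =>
        if gget st.1 j i = 1 then
          let rr := floodB row col st.1 j i
          let cols := rr.2.map (fun c => c.2)
          let size : Int := (rr.2.length : Int)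
          let l := (PySem.List.min? cols (fun v => v)).getD 0  -- min(cols); cols ≠ []
          let r := (PySem.List.max? cols (fun v => v)).getD 0  -- max(cols); cols ≠ []
          let d1 := PySem.List.pySetD st.2 l (PySem.List.pyGetD st.2 l 0 + size)
          (rr.1, PySem.List.pySetD d1 (r + 1) (PySem.List.pyGetD d1 (r + 1) 0 - size))
        else st) st)
    (land, List.replicate (col.toNat + 1) (0 : Int))
  ((PySem.List.pyRange 0 col 1).foldl (fun br k =>
      let run := br.2 + PySem.List.pyGetD st.2 k 0
      ((if br.1 < run then run else br.1), run)) ((0 : Int), (0 : Int))).1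

-- ===== PRECONDITION & SPEC =====
-- Pre_solution = exactly the inputs where the Python A returns: a nonempty grid whose first
-- row is nonempty (else IndexError on land[0] / ValueError on max([])) and whose every row
-- has at least len(land[0]) cells (a shorter row raises IndexError in the column scan).
def Pre_solution (land : List (List Int)) : Prop :=
  land ≠ [] ∧ 1 ≤ (land.headD []).length ∧
    ∀ rw ∈ land, (land.headD []).length ≤ rw.length

instance (land : List (List Int)) : Decidable (Pre_solution land) := by
  unfold Pre_solution; infer_instance

def pvWitness_solution : List (List Int) := [[1, 0], [0, 1]]

def Spec_solution (land : List (List Int)) (out : Int) : Prop := out = solution_alt land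
instance (land : List (List Int)) (out : Int) : Decidable (Spec_solution land out) := by
  unfold Spec_solution; infer_instance

-- ===== CLAIM (what is proved, stated in full; the proofs are below) =====
def Claim_equal_solution : Prop :=
  ∀ (land : List (List Int)), Dom_solution land → Pre_solution land →
    Spec_solution land (solution land)

-- ===== LEMMAS AND PROOFS =====

-- proof-side vocabulary
def nbrs (c : Int × Int) : List (Int × Int) :=
  [(c.1 - 1, c.2), (c.1 + 1, c.2), (c.1, c.2 - 1), (c.1, c.2 + 1)]

def okc (row col : Int) (g : List (List Int)) (n : Int × Int) : Bool :=
  decide (0 ≤ n.1 ∧ n.1 < row ∧ 0 ≤ n.2 ∧ n.2 < col) && decide (gget g n.1 n.2 = 1)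

def newOfT (row col : Int) (g : List (List Int)) (ts : List (Int × Int)) : List (Int × Int) :=
  ts.filter (okc row col g)

def newOf (row col : Int) (g : List (List Int)) (c : Int × Int) : List (Int × Int) :=
  newOfT row col g (nbrs c)

def zl (g : List (List Int)) (L : List (Int × Int)) : List (List Int) :=
  L.foldl (fun g n => gset g n.1 n.2 0) g

def fm (l : Int) (N : List (Int × Int)) : Int :=
  N.foldl (fun a n => if n.2 < a then n.2 else a) l

def fM (r : Int) (N : List (Int × Int)) : Int :=
  N.foldl (fun a n => if a < n.2 then n.2 else a) r

def meas (g : List (List Int)) (q : List (Int × Int)) : Nat := ones g + q.length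

-- grid pointwise lemmas
theorem sum_set_nat (l : List Nat) (i v : Nat) (h : i < l.length) :
    (l.set i v).sum + l.getD i 0 = l.sum + v := by
  induction l generalizing i with
  | nil => simp at h
  | cons a t ih =>
    cases i with
    | zero => simp [List.set]; omega
    | succ n =>
      simp only [List.set, List.sum_cons, List.getD_cons_succ]
      have := ih n (by simpa using h)
      omega

theorem count_set_one (l : List Int) (j : Nat) (h : j < l.length) (h1 : l.getD j 0 = 1) :
    (l.set j 0).count 1 + 1 = l.count 1 := by
  induction l generalizing j with
  | nil => simp at h
  | cons a t ih =>
    cases j with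
    | zero =>
      simp only [List.getD_cons_zero] at h1
      subst h1
      simp [List.set, List.count_cons]
    | succ n =>
      simp only [List.set, List.count_cons]
      have := ih n (by simpa using h) (by simpa using h1)
      split_ifs <;> omega

theorem getD_set_gen {α : Type} (l : List α) (i j : Nat) (a d : α) :
    (l.set i a).getD j d = if i = j ∧ i < l.length then a else l.getD j d := by
  simp only [List.getD, List.getElem?_set]
  split_ifs <;> simp_all <;> omega

theorem getDq_set {α : Type} (l : List α) (i j : Nat) (a d : α) :
    ((l.set i a)[j]?.getD d) = if i = j ∧ i < l.length then a else (l[j]?.getD d) := by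
  simp only [List.getElem?_set]
  split_ifs <;> simp_all <;> omega

theorem gget_gset (g : List (List Int)) (x y a b : Int) :
    gget (gset g x y 0) a b = if a = x ∧ b = y then 0 else gget g a b := by
  unfold gget gset
  by_cases hx : 0 ≤ x ∧ 0 ≤ y <;> by_cases hab : 0 ≤ a ∧ 0 ≤ b <;>
    simp only [hx, hab] <;>
    split_ifs <;>
      first
        | rfl
        | omega
        | (exfalso; omega)
        | (simp_all only [List.getD] <;>
           rw [getDq_set] <;> split_ifs <;>
             first
               | (rw [getDq_set] <;> split_ifs <;>
                    first
                      | rfl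
                      | omega
                      | (exfalso; omega)
                      | (simp_all; try rw [List.getElem?_eq_none (by omega)]; simp_all))
               | rfl
               | omega
               | (exfalso; omega)
               | (simp_all; try rw [List.getElem?_eq_none (by omega)]; simp_all))

theorem zl_gget (g : List (List Int)) (L : List (Int × Int)) (a b : Int) :
    gget (zl g L) a b = if (a, b) ∈ L then 0 else gget g a b := by
  induction L generalizing g with
  | nil => simp [zl]
  | cons n t ih =>
    show gget (zl (gset g n.1 n.2 0) t) a b = _
    rw [ih, gget_gset]
    by_cases h1 : (a, b) ∈ t <;> by_cases h2 : a = n.1 ∧ b = n.2 <;>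
      simp_all [List.mem_cons, Prod.ext_iff]

theorem ones_gset (g : List (List Int)) (x y : Int) (h : gget g x y = 1) :
    ones (gset g x y 0) + 1 = ones g := by
  unfold gget at h
  by_cases hx : 0 ≤ x ∧ 0 ≤ y
  · rw [if_pos hx] at h
    have hxl : x.toNat < g.length := by
      by_contra hc
      rw [show g.getD x.toNat [] = [] from List.getD_eq_default _ _ (by omega)] at h
      simp at h
    have hyl : y.toNat < (g.getD x.toNat []).length := by
      by_contra hc
      rw [List.getD_eq_default _ _ (by omega)] at h
      simp at h
    unfold gset ones
    rw [if_pos hx, List.map_set]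
    have hs := sum_set_nat (g.map (fun rw => rw.count 1)) x.toNat (((g.getD x.toNat []).set y.toNat 0).count 1) (by simpa using hxl)
    have hget : (g.map (fun rw => rw.count 1)).getD x.toNat 0 = (g.getD x.toNat []).count 1 := by
      rw [List.getD_eq_getElem _ _ (by simpa using hxl), List.getElem_map,
          List.getD_eq_getElem _ _ hxl]
    rw [hget] at hs
    have hc := count_set_one (g.getD x.toNat []) y.toNat hyl h
    omega
  · rw [if_neg hx] at h; simp at h

theorem ones_zl : ∀ (L : List (Int × Int)) (g : List (List Int)), L.Nodup →
    (∀ n ∈ L, gget g n.1 n.2 = 1) → ones (zl g L) + L.length = ones g := by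
  intro L
  induction L with
  | nil => intro g _ _; rfl
  | cons n t ih =>
    intro g hnd h1
    show ones (zl (gset g n.1 n.2 0) t) + (t.length + 1) = ones g
    have hstep := ones_gset g n.1 n.2 (h1 n (by simp))
    have ht : ∀ m ∈ t, gget (gset g n.1 n.2 0) m.1 m.2 = 1 := by
      intro m hm
      rw [gget_gset, if_neg]
      · exact h1 m (by simp [hm])
      · intro ⟨hx, hy⟩
        exact (List.nodup_cons.mp hnd).1 (by rwa [show m = n from Prod.ext hx hy] at hm)
    have := ih (gset g n.1 n.2 0) (List.nodup_cons.mp hnd).2 ht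
    omega

-- newOf facts
theorem nbrs_nodup (c : Int × Int) : (nbrs c).Nodup := by
  simp [nbrs, Prod.ext_iff]
  omega

theorem mem_newOfT (row col : Int) (g : List (List Int)) (ts : List (Int × Int)) (n : Int × Int) :
    n ∈ newOfT row col g ts ↔
      n ∈ ts ∧ 0 ≤ n.1 ∧ n.1 < row ∧ 0 ≤ n.2 ∧ n.2 < col ∧ gget g n.1 n.2 = 1 := by
  simp [newOfT, okc, List.mem_filter, and_assoc]

theorem newOfT_zl (row col : Int) (g : List (List Int)) (ts L : List (Int × Int)) :
    newOfT row col (zl g L) ts = (newOfT row col g ts).filter (fun n => !decide (n ∈ L)) := by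
  unfold newOfT
  rw [List.filter_filter]
  apply List.filter_congr
  intro n _
  simp only [okc, zl_gget]
  by_cases hL : n ∈ L
  · simp [hL]
  · simp [hL]

-- the two neighbour folds, characterised
theorem visitA_fold (row col : Int) (ts : List (Int × Int)) (g : List (List Int))
    (q : List (Int × Int)) (l r : Int) (hnd : ts.Nodup) :
    ts.foldl (visitA row col) (g, q, l, r) =
      (zl g (newOfT row col g ts), q ++ newOfT row col g ts,
       fm l (newOfT row col g ts), fM r (newOfT row col g ts)) := by
  induction ts generalizing g q l r with
  | nil => simp [newOfT, zl, fm, fM]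
  | cons t ts ih =>
    have hnd' : ts.Nodup := (List.nodup_cons.mp hnd).2
    have htn : t ∉ ts := (List.nodup_cons.mp hnd).1
    rw [List.foldl_cons]
    by_cases hb : 0 ≤ t.1 ∧ t.1 < row ∧ 0 ≤ t.2 ∧ t.2 < col
    · by_cases h1 : gget g t.1 t.2 = 1
      · have hstep : visitA row col (g, q, l, r) t =
            (gset g t.1 t.2 0, q ++ [t], (if t.2 < l then t.2 else l),
             (if r < t.2 then t.2 else r)) := by
          unfold visitA
          rw [if_pos hb, if_pos h1]
        have hN : newOfT row col (gset g t.1 t.2 0) ts = newOfT row col g ts := by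
          rw [show gset g t.1 t.2 0 = zl g [t] from rfl, newOfT_zl]
          apply List.filter_eq_self.mpr
          intro m hm
          have hmts : m ∈ ts := ((mem_newOfT row col g ts m).mp hm).1
          simp only [List.mem_singleton, Bool.not_eq_eq_eq_not, Bool.not_true,
            decide_eq_false_iff_not]
          intro h
          exact htn (h ▸ hmts)
        have hcons : newOfT row col g (t :: ts) = t :: newOfT row col g ts := by
          simp [newOfT, List.filter_cons, okc, hb, h1]
        rw [hstep, ih _ _ _ _ hnd', hN, hcons]
        simp only [List.append_assoc, List.singleton_append]
        rfl
      · have hstep : visitA row col (g, q, l, r) t = (g, q, l, r) := by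
          simp [visitA, hb, h1]
        have hcons : newOfT row col g (t :: ts) = newOfT row col g ts := by
          simp [newOfT, List.filter_cons, okc, hb, h1]
        rw [hstep, ih _ _ _ _ hnd', hcons]
    · have hstep : visitA row col (g, q, l, r) t = (g, q, l, r) := by
        simp [visitA, hb]
      have hcons : newOfT row col g (t :: ts) = newOfT row col g ts := by
        simp [newOfT, List.filter_cons, okc, hb]
      rw [hstep, ih _ _ _ _ hnd', hcons]

theorem visitB_fold (row col : Int) (ts : List (Int × Int)) (g : List (List Int))
    (comp : List (Int × Int)) (hnd : ts.Nodup) :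
    ts.foldl (visitB row col) (g, comp) =
      (zl g (newOfT row col g ts), comp ++ newOfT row col g ts) := by
  induction ts generalizing g comp with
  | nil => simp [newOfT, zl]
  | cons t ts ih =>
    have hnd' : ts.Nodup := (List.nodup_cons.mp hnd).2
    have htn : t ∉ ts := (List.nodup_cons.mp hnd).1
    rw [List.foldl_cons]
    by_cases hb : 0 ≤ t.1 ∧ t.1 < row ∧ 0 ≤ t.2 ∧ t.2 < col
    · by_cases h1 : gget g t.1 t.2 = 1
      · have hstep : visitB row col (g, comp) t = (gset g t.1 t.2 0, comp ++ [t]) := by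
          unfold visitB
          rw [if_pos hb, if_pos h1]
        have hN : newOfT row col (gset g t.1 t.2 0) ts = newOfT row col g ts := by
          rw [show gset g t.1 t.2 0 = zl g [t] from rfl, newOfT_zl]
          apply List.filter_eq_self.mpr
          intro m hm
          have hmts : m ∈ ts := ((mem_newOfT row col g ts m).mp hm).1
          simp only [List.mem_singleton, Bool.not_eq_eq_eq_not, Bool.not_true,
            decide_eq_false_iff_not]
          intro h
          exact htn (h ▸ hmts)
        have hcons : newOfT row col g (t :: ts) = t :: newOfT row col g ts := by
          simp [newOfT, List.filter_cons, okc, hb, h1]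
        rw [hstep, ih _ _ hnd', hN, hcons]
        simp only [List.append_assoc, List.singleton_append]
        rfl
      · have hstep : visitB row col (g, comp) t = (g, comp) := by
          simp [visitB, hb, h1]
        have hcons : newOfT row col g (t :: ts) = newOfT row col g ts := by
          simp [newOfT, List.filter_cons, okc, hb, h1]
        rw [hstep, ih _ _ hnd', hcons]
    · have hstep : visitB row col (g, comp) t = (g, comp) := by
        simp [visitB, hb]
      have hcons : newOfT row col g (t :: ts) = newOfT row col g ts := by
        simp [newOfT, List.filter_cons, okc, hb]
      rw [hstep, ih _ _ hnd', hcons]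

-- single-step forms of the two loops
theorem loopA_step (row col : Int) (f : Nat) (g : List (List Int)) (x y : Int)
    (rest : List (Int × Int)) (s l r : Int) :
    loopA row col (f + 1) g ((x, y) :: rest) s l r =
      loopA row col f (zl g (newOf row col g (x, y))) (rest ++ newOf row col g (x, y))
        (s + 1) (fm l (newOf row col g (x, y))) (fM r (newOf row col g (x, y))) := by
  show loopA row col f _ _ _ _ _ = _
  have hfold : (PySem.List.pyRange 0 4 1).foldl
      (fun st k => visitA row col st (x + PySem.List.pyGetD dxA k 0, y + PySem.List.pyGetD dyA k 0))
      (g, rest, l, r) = (nbrs (x, y)).foldl (visitA row col) (g, rest, l, r) := by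
    rw [show PySem.List.pyRange 0 4 1 = [0, 1, 2, 3] from by decide]
    simp only [List.foldl_cons, List.foldl_nil, nbrs]
    rw [show PySem.List.pyGetD dxA (0 : Int) 0 = -1 from by decide,
        show PySem.List.pyGetD dxA (1 : Int) 0 = 1 from by decide,
        show PySem.List.pyGetD dxA (2 : Int) 0 = 0 from by decide,
        show PySem.List.pyGetD dxA (3 : Int) 0 = 0 from by decide,
        show PySem.List.pyGetD dyA (0 : Int) 0 = 0 from by decide,
        show PySem.List.pyGetD dyA (1 : Int) 0 = 0 from by decide,
        show PySem.List.pyGetD dyA (2 : Int) 0 = -1 from by decide,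
        show PySem.List.pyGetD dyA (3 : Int) 0 = 1 from by decide]
    simp only [add_zero, ← sub_eq_add_neg]
  rw [hfold, visitA_fold row col (nbrs (x, y)) g rest l r (nbrs_nodup _)]
  rfl

theorem loopB_step (row col : Int) (f : Nat) (g : List (List Int))
    (comp : List (Int × Int)) (k : Nat) (hk : k < comp.length) :
    loopB row col (f + 1) g comp k =
      loopB row col f (zl g (newOf row col g (comp.getD k (0, 0))))
        (comp ++ newOf row col g (comp.getD k (0, 0))) (k + 1) := by
  show (if k < comp.length then _ else _) = _
  rw [if_pos hk]
  have hfold := visitB_fold row col (nbrs (comp.getD k (0, 0))) g comp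
    (nbrs_nodup (comp.getD k (0, 0)))
  show loopB row col f ((nbrs (comp.getD k (0, 0))).foldl (visitB row col) (g, comp)).1
      ((nbrs (comp.getD k (0, 0))).foldl (visitB row col) (g, comp)).2 (k + 1) = _
  rw [hfold]
  rfl

theorem newOf_nodup (row col : Int) (g : List (List Int)) (c : Int × Int) :
    (newOf row col g c).Nodup := (nbrs_nodup c).filter _

theorem newOf_ones (row col : Int) (g : List (List Int)) (c : Int × Int) :
    ∀ n ∈ newOf row col g c, gget g n.1 n.2 = 1 := by
  intro n hn
  exact ((mem_newOfT row col g (nbrs c) n).mp hn).2.2.2.2.2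

theorem meas_step (row col : Int) (g : List (List Int)) (x y : Int)
    (rest : List (Int × Int)) :
    meas (zl g (newOf row col g (x, y))) (rest ++ newOf row col g (x, y)) + 1 =
      meas g ((x, y) :: rest) := by
  have h := ones_zl (newOf row col g (x, y)) g (newOf_nodup row col g (x, y))
    (newOf_ones row col g (x, y))
  simp only [meas, List.length_append, List.length_cons]
  omega

theorem fm_append (l : Int) (A B : List (Int × Int)) : fm l (A ++ B) = fm (fm l A) B :=
  List.foldl_append ..

theorem fM_append (r : Int) (A B : List (Int × Int)) : fM r (A ++ B) = fM (fM r A) B :=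
  List.foldl_append ..

-- B's arena only grows
theorem loopB_prefix (row col : Int) :
    ∀ (f : Nat) (g : List (List Int)) (comp : List (Int × Int)) (k : Nat),
      comp <+: (loopB row col f g comp k).2 := by
  intro f
  induction f with
  | zero => intro g comp k; exact List.prefix_refl _
  | succ f ihf =>
    intro g comp k
    by_cases hk : k < comp.length
    · rw [loopB_step row col f g comp k hk]
      exact (List.prefix_append _ _).trans (ihf _ _ _)
    · have hB : loopB row col (f + 1) g comp k = (g, comp) := by
        show (if k < comp.length then _ else _) = _
        rw [if_neg hk]
      rw [hB]

-- lock-step: A's queue is exactly the unread suffix of B's arena, A's running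
-- size/left/right are the length / running-min / running-max of the cells B appends
theorem syncL (row col : Int) :
    ∀ (f : Nat) (g : List (List Int)) (comp : List (Int × Int)) (k : Nat) (s l r : Int),
      k ≤ comp.length → meas g (comp.drop k) ≤ f →
      loopA row col f g (comp.drop k) s l r =
        ((loopB row col f g comp k).1,
         s + (((loopB row col f g comp k).2.length - k : Nat) : Int),
         fm l ((loopB row col f g comp k).2.drop comp.length),
         fM r ((loopB row col f g comp k).2.drop comp.length)) := by
  intro f
  induction f with
  | zero =>
    intro g comp k s l r hk hf
    have hlen := List.length_drop (l := comp) (i := k)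
    simp only [meas] at hf
    have hd : comp.drop k = [] := List.eq_nil_of_length_eq_zero (by omega)
    have hkl : k = comp.length := by
      rw [hd] at hlen; simp at hlen; omega
    rw [hd, hkl]
    show (g, s, l, r) = _
    simp [loopB, List.drop_length, fm, fM]
  | succ f ihf =>
    intro g comp k s l r hk hf
    by_cases hkl : k < comp.length
    · rcases hcv : comp.getD k (0, 0) with ⟨cx, cy⟩
      have hc : comp.drop k = (cx, cy) :: comp.drop (k + 1) := by
        rw [← hcv, List.getD_eq_getElem _ _ hkl]
        exact List.drop_eq_getElem_cons hkl
      set N := newOf row col g (cx, cy) with hN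
      have hstepB : loopB row col (f + 1) g comp k =
          loopB row col f (zl g N) (comp ++ N) (k + 1) := by
        rw [loopB_step row col f g comp k hkl, hcv]
      have hdropN : (comp ++ N).drop (k + 1) = comp.drop (k + 1) ++ N :=
        List.drop_append_of_le_length (by omega)
      have hmeas := meas_step row col g cx cy (comp.drop (k + 1))
      rw [← hc, ← hN] at hmeas
      have hih := ihf (zl g N) (comp ++ N) (k + 1) (s + 1) (fm l N) (fM r N)
        (by simp only [List.length_append]; omega) (by rw [hdropN]; omega)
      rw [hdropN] at hih
      rw [hc, loopA_step, hih, hstepB]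
      set P := loopB row col f (zl g N) (comp ++ N) (k + 1) with hP
      obtain ⟨E, hE⟩ : (comp ++ N) <+: P.2 := loopB_prefix row col f (zl g N) (comp ++ N) (k + 1)
      have hE2 : P.2 = comp ++ (N ++ E) := by rw [← hE]; simp
      have hd1 : P.2.drop comp.length = N ++ E := by rw [hE2, List.drop_left]
      have hd2 : P.2.drop (comp ++ N).length = E := by rw [← hE, List.drop_left]
      have hlenP : P.2.length = comp.length + N.length + E.length := by
        rw [hE2]; simp; omega
      simp only [Prod.mk.injEq]
      refine ⟨trivial, by omega, ?_, ?_⟩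
      · rw [hd1, hd2, fm_append]
      · rw [hd1, hd2, fM_append]
    · have hkeq : k = comp.length := by omega
      have hB : loopB row col (f + 1) g comp k = (g, comp) := by
        show (if k < comp.length then _ else _) = _
        rw [if_neg hkl]
      have hd : comp.drop k = [] := by rw [hkeq]; exact List.drop_length
      rw [hd]
      show (g, s, l, r) = _
      rw [hB, hkeq]
      simp [List.drop_length, fm, fM]

-- running-min/-max over columns = Python's min/max over the collected column list
theorem fm_eq_foldl_min (L : List (Int × Int)) : ∀ (l : Int),
    fm l L = (L.map Prod.snd).foldl min l := by
  induction L with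
  | nil => intro l; rfl
  | cons n t ih =>
    intro l
    show fm (if n.2 < l then n.2 else l) t = (t.map Prod.snd).foldl min (min l n.2)
    rw [ih]
    congr 1
    rw [min_def]
    split_ifs <;> omega

theorem fM_eq_foldl_max (L : List (Int × Int)) : ∀ (r : Int),
    fM r L = (L.map Prod.snd).foldl max r := by
  induction L with
  | nil => intro r; rfl
  | cons n t ih =>
    intro r
    show fM (if r < n.2 then n.2 else r) t = (t.map Prod.snd).foldl max (max r n.2)
    rw [ih]
    congr 1
    rw [max_def]
    split_ifs <;> omega

-- the bridge: A's whole bfs equals B's flood plus len/min/max read off the arena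
theorem floodB_bfsA (row col : Int) (g : List (List Int)) (j i : Int) :
    bfsA row col g j i =
      ((floodB row col g j i).1, ((floodB row col g j i).2.length : Int),
       fm i ((floodB row col g j i).2.drop 1),
       fM i ((floodB row col g j i).2.drop 1)) := by
  have h := syncL row col (ones (gset g j i 0) + 1) (gset g j i 0) [(j, i)] 0 0 i i
    (by simp) (by simp [meas])
  simp only [List.drop_zero] at h
  show loopA row col (ones (gset g j i 0) + 1) (gset g j i 0) [(j, i)] 0 i i = _
  rw [h]
  refine congrArg (fun z => ((floodB row col g j i).1, z,
    fm i ((floodB row col g j i).2.drop 1), fM i ((floodB row col g j i).2.drop 1))) ?_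
  show 0 + (((floodB row col g j i).2.length - 0 : Nat) : Int) = _
  omega

theorem floodB_head (row col : Int) (g : List (List Int)) (j i : Int) :
    ∃ E, (floodB row col g j i).2 = (j, i) :: E := by
  obtain ⟨E, hE⟩ := loopB_prefix row col (ones (gset g j i 0) + 1) (gset g j i 0) [(j, i)] 0
  refine ⟨E, ?_⟩
  show (loopB row col (ones (gset g j i 0) + 1) (gset g j i 0) [(j, i)] 0).2 = (j, i) :: E
  rw [← hE]
  rfl

-- bounds on loopA's result, for the dp/diff bookkeeping
theorem fm_bounds (col : Int) : ∀ (N : List (Int × Int)) (l : Int),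
    (∀ n ∈ N, 0 ≤ n.2 ∧ n.2 < col) → 0 ≤ l → 0 ≤ fm l N ∧ fm l N ≤ l := by
  intro N
  induction N with
  | nil => intro l _ hl; exact ⟨hl, le_refl _⟩
  | cons n t ih =>
    intro l hb hl
    have hn := hb n (by simp)
    have step : fm l (n :: t) = fm (if n.2 < l then n.2 else l) t := rfl
    rw [step]
    have := ih (if n.2 < l then n.2 else l) (fun m hm => hb m (by simp [hm]))
      (by split_ifs <;> omega)
    constructor
    · exact this.1
    · have h2 := this.2
      split_ifs at h2 <;> omega

theorem fM_bounds (col : Int) : ∀ (N : List (Int × Int)) (r : Int),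
    (∀ n ∈ N, 0 ≤ n.2 ∧ n.2 < col) → r < col → r ≤ fM r N ∧ fM r N < col := by
  intro N
  induction N with
  | nil => intro r _ hr; exact ⟨le_refl _, hr⟩
  | cons n t ih =>
    intro r hb hr
    have hn := hb n (by simp)
    have step : fM r (n :: t) = fM (if r < n.2 then n.2 else r) t := rfl
    rw [step]
    have := ih (if r < n.2 then n.2 else r) (fun m hm => hb m (by simp [hm]))
      (by split_ifs <;> omega)
    constructor
    · have h2 := this.1
      split_ifs at h2 <;> omega
    · exact this.2

theorem loopA_bounds (row col : Int) :
    ∀ (f : Nat) (g : List (List Int)) (q : List (Int × Int)) (s l r : Int),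
      0 ≤ l → l ≤ r → r < col → 0 ≤ s →
      0 ≤ (loopA row col f g q s l r).2.2.1 ∧
      (loopA row col f g q s l r).2.2.1 ≤ (loopA row col f g q s l r).2.2.2 ∧
      (loopA row col f g q s l r).2.2.2 < col ∧
      0 ≤ (loopA row col f g q s l r).2.1 := by
  intro f
  induction f with
  | zero => intro g q s l r h1 h2 h3 h4; exact ⟨h1, h2, h3, h4⟩
  | succ f ihf =>
    intro g q s l r h1 h2 h3 h4
    cases q with
    | nil => exact ⟨h1, h2, h3, h4⟩
    | cons hd rest =>
      obtain ⟨x, y⟩ := hd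
      rw [loopA_step]
      have hbN : ∀ n ∈ newOf row col g (x, y), 0 ≤ n.2 ∧ n.2 < col := by
        intro n hn
        have := (mem_newOfT row col g (nbrs (x, y)) n).mp hn
        exact ⟨this.2.2.2.1, this.2.2.2.2.1⟩
      have hfm := fm_bounds col (newOf row col g (x, y)) l hbN h1
      have hfM := fM_bounds col (newOf row col g (x, y)) r hbN h3
      exact ihf _ _ _ _ _ hfm.1 (by omega) hfM.2 (by omega)

theorem sum_take_set (d : List Int) : ∀ (i m : Nat) (v : Int), i < d.length →
    ((d.set i v).take m).sum = (d.take m).sum + (if i < m then v - d.getD i 0 else 0) := by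
  induction d with
  | nil => intro i m v h; simp at h
  | cons a t ih =>
    intro i m v h
    cases i with
    | zero =>
      cases m with
      | zero => simp
      | succ m' => simp [List.set, List.take_succ_cons]; ring
    | succ i' =>
      cases m with
      | zero => simp
      | succ m' =>
        simp only [List.set, List.take_succ_cons, List.sum_cons, List.getD_cons_succ]
        have := ih i' m' v (by simpa using h)
        split_ifs at * <;> omega

theorem sum_take_succ (d : List Int) (m : Nat) (h : m < d.length) :
    (d.take (m + 1)).sum = (d.take m).sum + d.getD m 0 := by
  rw [List.take_succ, List.sum_append, List.getElem?_eq_getElem h]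
  simp [List.getD, List.getElem?_eq_getElem h]

theorem rangeAdd_spec (s : Int) : ∀ (k : Nat) (a b : Int) (dp : List Int), 0 ≤ a →
    b - a ≤ (k : Int) → b ≤ (dp.length : Int) →
    (((PySem.List.pyRange a b 1).foldl
      (fun dp k => PySem.List.pySetD dp k (PySem.List.pyGetD dp k 0 + s)) dp).length = dp.length ∧
    ∀ j : Nat, ((PySem.List.pyRange a b 1).foldl
      (fun dp k => PySem.List.pySetD dp k (PySem.List.pyGetD dp k 0 + s)) dp).getD j 0 =
        dp.getD j 0 + if a ≤ (j : Int) ∧ (j : Int) < b then s else 0) := by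
  intro k
  induction k with
  | zero =>
    intro a b dp ha hk hb
    rw [PySem.List.pyRange_one_eq_nil (by omega)]
    refine ⟨rfl, fun j => ?_⟩
    rw [if_neg (by omega)]
    simp
  | succ k' ih =>
    intro a b dp ha hk hb
    by_cases hab : b ≤ a
    · rw [PySem.List.pyRange_one_eq_nil hab]
      refine ⟨rfl, fun j => ?_⟩
      rw [if_neg (by omega)]
      simp
    · rw [PySem.List.pyRange_one_cons (by omega), List.foldl_cons]
      have hset : PySem.List.pySetD dp a (PySem.List.pyGetD dp a 0 + s) =
          dp.set a.toNat (PySem.List.pyGetD dp a 0 + s) := PySem.List.pySetD_of_nonneg dp _ ha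
      have hlen : (dp.set a.toNat (PySem.List.pyGetD dp a 0 + s)).length = dp.length := by simp
      have ihh := ih (a + 1) b (dp.set a.toNat (PySem.List.pyGetD dp a 0 + s))
        (by omega) (by omega) (by rw [hlen]; omega)
      rw [hset]
      refine ⟨by rw [ihh.1, hlen], fun j => ?_⟩
      have hget : PySem.List.pyGetD dp a 0 = dp.getD a.toNat 0 := by
        rw [PySem.List.pyGetD_eq_getElem dp 0 ha (by omega)]
        rw [List.getD_eq_getElem _ _ (by omega)]
      rw [ihh.2 j, getD_set_gen, hget]
      clear ih ihh
      split_ifs <;> simp_all <;> omega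

-- dp/diff relation
def RelDD (col : Int) (dp diff : List Int) : Prop :=
  dp.length = col.toNat ∧ diff.length = col.toNat + 1 ∧
    (∀ k : Nat, k < col.toNat → dp.getD k 0 = (diff.take (k + 1)).sum) ∧
    (∀ k : Nat, k < col.toNat → 0 ≤ dp.getD k 0)

theorem RelDD_init (col : Int) :
    RelDD col (List.replicate col.toNat 0) (List.replicate (col.toNat + 1) 0) := by
  refine ⟨by simp, by simp, fun k hk => ?_, fun k hk => by simp [List.getD_replicate]⟩
  rw [List.take_replicate, List.getD_replicate]
  · simp
  · omega

theorem RelDD_update (col : Int) (dp diff : List Int) (l r s : Int)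
    (h : RelDD col dp diff) (hl : 0 ≤ l) (hlr : l ≤ r) (hr : r < col) (hs : 0 ≤ s) :
    RelDD col
      ((PySem.List.pyRange l (r + 1) 1).foldl
        (fun dp k => PySem.List.pySetD dp k (PySem.List.pyGetD dp k 0 + s)) dp)
      (PySem.List.pySetD (PySem.List.pySetD diff l (PySem.List.pyGetD diff l 0 + s))
        (r + 1) (PySem.List.pyGetD (PySem.List.pySetD diff l (PySem.List.pyGetD diff l 0 + s)) (r + 1) 0 - s)) := by
  obtain ⟨hdp, hdiff, hpre, hpos⟩ := h
  have hcol0 : 0 < col := by omega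
  have hra := rangeAdd_spec s (r + 1 - l).toNat l (r + 1) dp hl (by omega) (by omega)
  have hd1 : PySem.List.pySetD diff l (PySem.List.pyGetD diff l 0 + s) =
      diff.set l.toNat (PySem.List.pyGetD diff l 0 + s) := PySem.List.pySetD_of_nonneg diff _ hl
  have hllen : l.toNat < diff.length := by omega
  have hrlen : (r + 1).toNat < diff.length := by omega
  have hd2 : PySem.List.pySetD (diff.set l.toNat (PySem.List.pyGetD diff l 0 + s))
        (r + 1) (PySem.List.pyGetD (diff.set l.toNat (PySem.List.pyGetD diff l 0 + s)) (r + 1) 0 - s) =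
      (diff.set l.toNat (PySem.List.pyGetD diff l 0 + s)).set (r + 1).toNat
        (PySem.List.pyGetD (diff.set l.toNat (PySem.List.pyGetD diff l 0 + s)) (r + 1) 0 - s) :=
    PySem.List.pySetD_of_nonneg _ _ (by omega)
  rw [hd1, hd2]
  have hgl : PySem.List.pyGetD diff l 0 = diff.getD l.toNat 0 := by
    rw [PySem.List.pyGetD_eq_getElem diff 0 hl (by omega)]
    rw [List.getD_eq_getElem _ _ (by omega)]
  have hgr : PySem.List.pyGetD (diff.set l.toNat (PySem.List.pyGetD diff l 0 + s)) (r + 1) 0 =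
      (diff.set l.toNat (PySem.List.pyGetD diff l 0 + s)).getD (r + 1).toNat 0 := by
    rw [PySem.List.pyGetD_eq_getElem _ 0 (by omega) (by simp; omega)]
    rw [List.getD_eq_getElem _ _ (by simp; omega)]
  refine ⟨by rw [hra.1, hdp], by simp [hdiff], fun k hk => ?_, fun k hk => ?_⟩
  · rw [hra.2 k]
    have hsum2 := sum_take_set (diff.set l.toNat (PySem.List.pyGetD diff l 0 + s))
      (r + 1).toNat (k + 1) (PySem.List.pyGetD (diff.set l.toNat (PySem.List.pyGetD diff l 0 + s)) (r + 1) 0 - s) (by simp; omega)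
    have hsum1 := sum_take_set diff l.toNat (k + 1) (PySem.List.pyGetD diff l 0 + s) hllen
    rw [hsum2, hsum1, hpre k hk, hgr, hgl]
    have hgl2 : (diff.set l.toNat (diff.getD l.toNat 0 + s)).getD (r + 1).toNat 0 =
        diff.getD (r + 1).toNat 0 := by
      rw [getD_set_gen, if_neg (by omega)]
    rw [hgl2]
    split_ifs <;> omega
  · rw [hra.2 k]
    have := hpos k hk
    split_ifs <;> omega

theorem final_eq (col : Int) (dp diff : List Int) (h : RelDD col dp diff) (hc : 1 ≤ col) :
    ((PySem.List.max? dp (fun v => v)).getD 0) =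
      ((PySem.List.pyRange 0 col 1).foldl (fun br k =>
        let run := br.2 + PySem.List.pyGetD diff k 0
        ((if br.1 < run then run else br.1), run)) ((0 : Int), (0 : Int))).1 := by
  obtain ⟨hdp, hdiff, hpre, hpos⟩ := h
  have hn1 : 1 ≤ col.toNat := by omega
  have scan : ∀ m : Nat, m ≤ col.toNat →
      (PySem.List.pyRange 0 (m : Int) 1).foldl (fun br k =>
        let run := br.2 + PySem.List.pyGetD diff k 0
        ((if br.1 < run then run else br.1), run)) ((0 : Int), (0 : Int)) =
      ((dp.take m).foldl max 0, (diff.take m).sum) := by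
    intro m
    induction m with
    | zero => intro _; rw [PySem.List.pyRange_one_eq_nil (by omega)]; simp
    | succ m' ihm =>
      intro hm
      rw [show ((m' + 1 : Nat) : Int) = (m' : Int) + 1 by push_cast; ring,
        PySem.List.pyRange_one_succ_right (by omega), List.foldl_append, ihm (by omega),
        List.foldl_cons, List.foldl_nil]
      have hmlt : m' < dp.length := by omega
      have hmd : m' < diff.length := by omega
      have hrun : (diff.take m').sum + PySem.List.pyGetD diff (m' : Int) 0 =
          (diff.take (m' + 1)).sum := by
        rw [PySem.List.pyGetD_natCast, sum_take_succ diff m' hmd]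
      have htake : (dp.take (m' + 1)).foldl max 0 =
          max ((dp.take m').foldl max 0) (dp.getD m' 0) := by
        rw [List.take_add_one, List.foldl_append]
        simp [List.getElem?_eq_getElem hmlt, List.getD_eq_getElem dp _ hmlt]
      have hdm : dp.getD m' 0 = (diff.take (m' + 1)).sum := hpre m' (by omega)
      simp only [hrun, htake, hdm]
      refine congrArg (fun z => (z, (diff.take (m' + 1)).sum)) ?_
      rw [max_def]
      split_ifs <;> omega
  have hfin := scan col.toNat (le_refl _)
  rw [show ((col.toNat : Nat) : Int) = col by omega] at hfin
  rw [hfin]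
  have htk : dp.take col.toNat = dp := by rw [← hdp]; exact List.take_length
  rw [htk]
  cases dp with
  | nil => simp at hdp; omega
  | cons x t =>
    rw [PySem.List.max?_id_cons]
    have hx : 0 ≤ x := by
      have := hpos 0 (by omega)
      simpa using this
    show t.foldl max x = (x :: t).foldl max 0
    rw [List.foldl_cons, max_eq_right hx]

def stepA (row col i : Int) (st : List (List Int) × List Int) (j : Int) :
    List (List Int) × List Int :=
  if gget st.1 j i = 1 then
    let rr := bfsA row col st.1 j i
    (rr.1,
     (PySem.List.pyRange rr.2.2.1 (rr.2.2.2 + 1) 1).foldl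
       (fun dp k => PySem.List.pySetD dp k (PySem.List.pyGetD dp k 0 + rr.2.1)) st.2)
  else st

def stepB (row col i : Int) (st : List (List Int) × List Int) (j : Int) :
    List (List Int) × List Int :=
  if gget st.1 j i = 1 then
    let rr := floodB row col st.1 j i
    let cols := rr.2.map (fun c => c.2)
    let size : Int := (rr.2.length : Int)
    let l := (PySem.List.min? cols (fun v => v)).getD 0
    let r := (PySem.List.max? cols (fun v => v)).getD 0
    let d1 := PySem.List.pySetD st.2 l (PySem.List.pyGetD st.2 l 0 + size)
    (rr.1, PySem.List.pySetD d1 (r + 1) (PySem.List.pyGetD d1 (r + 1) 0 - size))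
  else st

-- one inner-loop body: same grid, and the dp/diff relation is preserved
theorem innerRel (row col i : Int) (h0 : 0 ≤ i) (h1 : i < col) :
    ∀ (js : List Int) (g : List (List Int)) (dp diff : List Int), RelDD col dp diff →
    (js.foldl (stepA row col i) (g, dp)).1 = (js.foldl (stepB row col i) (g, diff)).1 ∧
    RelDD col (js.foldl (stepA row col i) (g, dp)).2 (js.foldl (stepB row col i) (g, diff)).2 := by
  intro js
  induction js with
  | nil => intro g dp diff h; exact ⟨rfl, h⟩
  | cons j t ih =>
    intro g dp diff h
    rw [List.foldl_cons, List.foldl_cons]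
    by_cases hg : gget g j i = 1
    · obtain ⟨E, hE⟩ := floodB_head row col g j i
      have hdropE : (floodB row col g j i).2.drop 1 = E := by rw [hE]; rfl
      -- B's min/max over the collected columns = A's running fm/fM
      have hlB : (PySem.List.min? ((floodB row col g j i).2.map (fun c => c.2))
          (fun v => v)).getD 0 = fm i ((floodB row col g j i).2.drop 1) := by
        rw [hdropE, hE]
        show (PySem.List.min? (i :: E.map (fun c => c.2)) (fun v => v)).getD 0 = fm i E
        rw [PySem.List.min?_id_cons]
        show (E.map (fun c => c.2)).foldl min i = fm i E
        rw [fm_eq_foldl_min]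
      have hrB : (PySem.List.max? ((floodB row col g j i).2.map (fun c => c.2))
          (fun v => v)).getD 0 = fM i ((floodB row col g j i).2.drop 1) := by
        rw [hdropE, hE]
        show (PySem.List.max? (i :: E.map (fun c => c.2)) (fun v => v)).getD 0 = fM i E
        rw [PySem.List.max?_id_cons]
        show (E.map (fun c => c.2)).foldl max i = fM i E
        rw [fM_eq_foldl_max]
      rcases hq : bfsA row col g j i with ⟨G2, sz, lv, rv⟩
      have hbr := floodB_bfsA row col g j i
      rw [hq] at hbr
      simp only [Prod.mk.injEq] at hbr
      obtain ⟨e1, e2, e3, e4⟩ := hbr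
      -- bounds from A's loop
      have hbfs : bfsA row col g j i =
          loopA row col (ones (gset g j i 0) + 1) (gset g j i 0) [(j, i)] 0 i i := rfl
      have hb := loopA_bounds row col (ones (gset g j i 0) + 1) (gset g j i 0) [(j, i)] 0 i i
        h0 (le_refl i) h1 (le_refl 0)
      rw [← hbfs, hq] at hb
      have hA : stepA row col i (g, dp) j =
          (G2, (PySem.List.pyRange lv (rv + 1) 1).foldl
            (fun dp k => PySem.List.pySetD dp k (PySem.List.pyGetD dp k 0 + sz)) dp) := by
        simp only [stepA, hg, if_pos, hq]
      have hB2 : stepB row col i (g, diff) j =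
          (G2, PySem.List.pySetD
            (PySem.List.pySetD diff lv (PySem.List.pyGetD diff lv 0 + sz))
            (rv + 1)
            (PySem.List.pyGetD
              (PySem.List.pySetD diff lv (PySem.List.pyGetD diff lv 0 + sz))
              (rv + 1) 0 - sz)) := by
        simp only [stepB, hg, if_pos]
        rw [hlB, hrB, ← e1, ← e2, ← e3, ← e4]
      rw [hA, hB2]
      exact ih _ _ _ (RelDD_update col dp diff lv rv sz h hb.1 hb.2.1 hb.2.2.1 hb.2.2.2)
    · have hsa : stepA row col i (g, dp) j = (g, dp) := by
        simp only [stepA]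
        rw [if_neg hg]
      have hsb : stepB row col i (g, diff) j = (g, diff) := by
        simp only [stepB]
        rw [if_neg hg]
      rw [hsa, hsb]
      exact ih _ _ _ h

theorem outerRel (row col : Int) :
    ∀ (is : List Int), (∀ i ∈ is, 0 ≤ i ∧ i < col) →
    ∀ (g : List (List Int)) (dp diff : List Int), RelDD col dp diff →
    ((is.foldl (fun st i => (PySem.List.pyRange 0 row 1).foldl (stepA row col i) st) (g, dp)).1 =
     (is.foldl (fun st i => (PySem.List.pyRange 0 row 1).foldl (stepB row col i) st) (g, diff)).1) ∧
    RelDD col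
      (is.foldl (fun st i => (PySem.List.pyRange 0 row 1).foldl (stepA row col i) st) (g, dp)).2
      (is.foldl (fun st i => (PySem.List.pyRange 0 row 1).foldl (stepB row col i) st) (g, diff)).2 := by
  intro is
  induction is with
  | nil => intro _ g dp diff h; exact ⟨rfl, h⟩
  | cons i t ih =>
    intro hmem g dp diff h
    rw [List.foldl_cons, List.foldl_cons]
    have hi := hmem i (by simp)
    have hin := innerRel row col i hi.1 hi.2 (PySem.List.pyRange 0 row 1) g dp diff h
    obtain ⟨hg1, hrel1⟩ := hin
    have hA : ((PySem.List.pyRange 0 row 1).foldl (stepA row col i) (g, dp)) =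
        (((PySem.List.pyRange 0 row 1).foldl (stepB row col i) (g, diff)).1,
         ((PySem.List.pyRange 0 row 1).foldl (stepA row col i) (g, dp)).2) := by
      rw [← hg1]
    rw [hA]
    exact ih (fun i' hi' => hmem i' (by simp [hi']))
      ((PySem.List.pyRange 0 row 1).foldl (stepB row col i) (g, diff)).1
      ((PySem.List.pyRange 0 row 1).foldl (stepA row col i) (g, dp)).2
      ((PySem.List.pyRange 0 row 1).foldl (stepB row col i) (g, diff)).2 hrel1

-- ===== VERDICT (by name: the statement is the Claim_ definition above) =====
theorem solution_spec : Claim_equal_solution := by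
  intro land _ hpre
  unfold Spec_solution
  obtain ⟨hne, hlen, _⟩ := hpre
  have hcol1 : 1 ≤ ((land.headD []).length : Int) := by exact_mod_cast hlen
  have hA : solution land =
      ((PySem.List.max? ((PySem.List.pyRange 0 ((land.headD []).length : Int) 1).foldl
        (fun st i => (PySem.List.pyRange 0 (land.length : Int) 1).foldl
          (stepA (land.length : Int) ((land.headD []).length : Int) i) st)
        (land, List.replicate ((land.headD []).length : Int).toNat (0 : Int))).2
        (fun v => v)).getD 0) := rfl
  have hB : solution_alt land =
      ((PySem.List.pyRange 0 ((land.headD []).length : Int) 1).foldl (fun br k =>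
        let run := br.2 + PySem.List.pyGetD ((PySem.List.pyRange 0 ((land.headD []).length : Int) 1).foldl
          (fun st i => (PySem.List.pyRange 0 (land.length : Int) 1).foldl
            (stepB (land.length : Int) ((land.headD []).length : Int) i) st)
          (land, List.replicate (((land.headD []).length : Int).toNat + 1) (0 : Int))).2 k 0
        ((if br.1 < run then run else br.1), run)) ((0 : Int), (0 : Int))).1 := rfl
  rw [hA, hB]
  have hout := outerRel (land.length : Int) ((land.headD []).length : Int)
    (PySem.List.pyRange 0 ((land.headD []).length : Int) 1)
    (fun i hi => (PySem.List.mem_pyRange_one.mp hi))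
    land (List.replicate ((land.headD []).length : Int).toNat (0 : Int))
    (List.replicate (((land.headD []).length : Int).toNat + 1) (0 : Int))
    (RelDD_init ((land.headD []).length : Int))
  exact final_eq ((land.headD []).length : Int) _ _ hout.2 hcol1
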